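-- pv_equiv track=rewrite | github.com/Kulak-Informatica/Python | Oefeningen/12b - Roosters/Kleurendriehoek.py | kleuren
-- ===== SOURCE A (Python) =====
-- def kleuren(driehoek):
--     rood, groen, geel = 0, 0, 0
--     for i in range(len(driehoek)):
--         for a in range(len(driehoek[i])):
--             if driehoek[i][a] == 'R':
--                 rood += 1
--             elif driehoek[i][a] == 'G':
--                 groen += 1
--             else:
--                 geel += 1
--     return groen, rood, geel
-- ===== SOURCE B (Python) =====
-- def kleuren(driehoek):
--     cells = [kleur for rij in driehoek for kleur in rij]
--     rood = cells.count('R')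
--     groen = cells.count('G')
--     return groen, rood, len(cells) - rood - groen
-- ===== Notes on version B (the rewrite author's own statement) =====
-- stated objective: simpler
-- what changed: Replaces the index-driven nested loops with per-branch counting by explicit accumulators by flattening the grid once and using list.count for 'R' and 'G', deriving the third count ('geel') arithmetically as total minus the other two instead of an else-branch.
import Mathlib
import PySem

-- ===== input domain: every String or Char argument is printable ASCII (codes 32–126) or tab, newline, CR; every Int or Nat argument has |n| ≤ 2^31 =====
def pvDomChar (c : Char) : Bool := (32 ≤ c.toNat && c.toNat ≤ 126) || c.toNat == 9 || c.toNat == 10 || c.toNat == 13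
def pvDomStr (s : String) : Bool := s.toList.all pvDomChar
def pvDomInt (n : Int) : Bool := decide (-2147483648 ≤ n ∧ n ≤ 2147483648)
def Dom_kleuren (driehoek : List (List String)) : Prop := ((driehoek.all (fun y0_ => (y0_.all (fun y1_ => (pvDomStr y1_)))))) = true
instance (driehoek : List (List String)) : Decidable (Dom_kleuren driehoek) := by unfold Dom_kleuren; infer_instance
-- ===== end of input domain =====

-- B flattens the grid once, counts 'R' and 'G' with list.count and derives the third
-- count arithmetically (simpler decomposition; same asymptotic cost).

-- ===== PORT A =====
def kleuren (driehoek : List (List String)) : Int × Int × Int :=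
  -- rood, groen, geel = 0, 0, 0; nested for over range(len(…)) with indexing
  let s : Int × Int × Int :=
    (PySem.List.pyRange 0 (PySem.List.len driehoek) 1).foldl
      (fun (s : Int × Int × Int) i =>
        let rij := PySem.List.pyGetD driehoek i []
        (PySem.List.pyRange 0 (PySem.List.len rij) 1).foldl
          (fun (s : Int × Int × Int) a =>
            let c := PySem.List.pyGetD rij a ""
            if c == "R" then (s.1 + 1, s.2.1, s.2.2)
            else if c == "G" then (s.1, s.2.1 + 1, s.2.2)
            else (s.1, s.2.1, s.2.2 + 1)) s)
      (0, 0, 0)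
  (s.2.1, s.1, s.2.2)

-- ===== PORT B =====
def kleuren_alt (driehoek : List (List String)) : Int × Int × Int :=
  let cells := driehoek.flatMap (fun rij => rij)
  let rood : Int := (cells.count "R" : Int)
  let groen : Int := (cells.count "G" : Int)
  (groen, rood, PySem.List.len cells - rood - groen)

-- ===== PRECONDITION & SPEC =====
def Spec_kleuren (driehoek : List (List String)) (out : Int × Int × Int) : Prop := out = kleuren_alt driehoek
instance (driehoek : List (List String)) (out : Int × Int × Int) : Decidable (Spec_kleuren driehoek out) := by unfold Spec_kleuren; infer_instance

-- ===== CLAIM (what is proved, stated in full; the proofs are below) =====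
def Claim_equal_kleuren : Prop := ∀ (driehoek : List (List String)), Dom_kleuren driehoek → Spec_kleuren driehoek (kleuren driehoek)

-- ===== LEMMAS AND PROOFS =====

-- A's inner loop over one row, started at (r, g, y), adds the row's R-count, G-count
-- and remaining-count to the three accumulators.
theorem kleuren_row_fold (rij : List String) (r g y : Int) :
    rij.foldl
      (fun (s : Int × Int × Int) c =>
        if c == "R" then (s.1 + 1, s.2.1, s.2.2)
        else if c == "G" then (s.1, s.2.1 + 1, s.2.2)
        else (s.1, s.2.1, s.2.2 + 1)) (r, g, y)
      = (r + (rij.count "R" : Int), g + (rij.count "G" : Int),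
         y + ((rij.length : Int) - (rij.count "R" : Int) - (rij.count "G" : Int))) := by
  induction rij generalizing r g y with
  | nil => simp
  | cons c cs ih =>
    simp only [List.foldl_cons]
    by_cases hR : c = "R"
    · rw [if_pos (by simp [hR]), ih]
      simp only [List.count_cons, List.length_cons, Prod.mk.injEq, beq_iff_eq]
      refine ⟨?_, ?_, ?_⟩ <;> split_ifs <;> push_cast <;> first | omega | simp_all
    · rw [if_neg (by simp [hR])]
      by_cases hG : c = "G"
      · rw [if_pos (by simp [hG]), ih]
        simp only [List.count_cons, List.length_cons, Prod.mk.injEq, beq_iff_eq]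
        refine ⟨?_, ?_, ?_⟩ <;> split_ifs <;> push_cast <;> first | omega | simp_all
      · rw [if_neg (by simp [hG]), ih]
        simp only [List.count_cons, List.length_cons, Prod.mk.injEq, beq_iff_eq]
        refine ⟨?_, ?_, ?_⟩ <;> split_ifs <;> push_cast <;> first | omega | simp_all

-- A's outer loop over all rows, characterized via the flattened cell list.
theorem kleuren_outer_fold (d : List (List String)) (r g y : Int) :
    d.foldl
      (fun (s : Int × Int × Int) rij =>
        rij.foldl
          (fun (s : Int × Int × Int) c =>
            if c == "R" then (s.1 + 1, s.2.1, s.2.2)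
            else if c == "G" then (s.1, s.2.1 + 1, s.2.2)
            else (s.1, s.2.1, s.2.2 + 1)) s) (r, g, y)
      = (r + ((d.flatMap (fun rij => rij)).count "R" : Int),
         g + ((d.flatMap (fun rij => rij)).count "G" : Int),
         y + (((d.flatMap (fun rij => rij)).length : Int)
              - ((d.flatMap (fun rij => rij)).count "R" : Int)
              - ((d.flatMap (fun rij => rij)).count "G" : Int))) := by
  induction d generalizing r g y with
  | nil => simp
  | cons rij rest ih =>
    simp only [List.foldl_cons, kleuren_row_fold, ih, List.flatMap_cons, List.count_append,
      List.length_append]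
    refine Prod.ext (by push_cast; ring) (Prod.ext (by push_cast; ring) (by push_cast; ring))

-- ===== VERDICT (by name: the statement is the Claim_ definition above) =====
theorem kleuren_spec : Claim_equal_kleuren := by
  intro d _
  show kleuren d = kleuren_alt d
  unfold kleuren kleuren_alt
  have h1 :
      (PySem.List.pyRange 0 (PySem.List.len d) 1).foldl
        (fun (s : Int × Int × Int) i =>
          let rij := PySem.List.pyGetD d i []
          (PySem.List.pyRange 0 (PySem.List.len rij) 1).foldl
            (fun (s : Int × Int × Int) a =>
              let c := PySem.List.pyGetD rij a ""
              if c == "R" then (s.1 + 1, s.2.1, s.2.2)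
              else if c == "G" then (s.1, s.2.1 + 1, s.2.2)
              else (s.1, s.2.1, s.2.2 + 1)) s)
        (0, 0, 0)
      = d.foldl
          (fun (s : Int × Int × Int) rij =>
            (PySem.List.pyRange 0 (PySem.List.len rij) 1).foldl
              (fun (s : Int × Int × Int) a =>
                if PySem.List.pyGetD rij a "" == "R" then (s.1 + 1, s.2.1, s.2.2)
                else if PySem.List.pyGetD rij a "" == "G" then (s.1, s.2.1 + 1, s.2.2)
                else (s.1, s.2.1, s.2.2 + 1)) s)
          (0, 0, 0) :=
    PySem.List.foldl_pyRange_pyGetD d []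
      (fun (s : Int × Int × Int) rij =>
        (PySem.List.pyRange 0 (PySem.List.len rij) 1).foldl
          (fun (s : Int × Int × Int) a =>
            if PySem.List.pyGetD rij a "" == "R" then (s.1 + 1, s.2.1, s.2.2)
            else if PySem.List.pyGetD rij a "" == "G" then (s.1, s.2.1 + 1, s.2.2)
            else (s.1, s.2.1, s.2.2 + 1)) s)
      (0, 0, 0) (a := 0) (by omega)
  have h2 :
      d.foldl
        (fun (s : Int × Int × Int) rij =>
          (PySem.List.pyRange 0 (PySem.List.len rij) 1).foldl
            (fun (s : Int × Int × Int) a =>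
              if PySem.List.pyGetD rij a "" == "R" then (s.1 + 1, s.2.1, s.2.2)
              else if PySem.List.pyGetD rij a "" == "G" then (s.1, s.2.1 + 1, s.2.2)
              else (s.1, s.2.1, s.2.2 + 1)) s)
        (0, 0, 0)
      = d.foldl
          (fun (s : Int × Int × Int) rij =>
            rij.foldl
              (fun (s : Int × Int × Int) c =>
                if c == "R" then (s.1 + 1, s.2.1, s.2.2)
                else if c == "G" then (s.1, s.2.1 + 1, s.2.2)
                else (s.1, s.2.1, s.2.2 + 1)) s)
          (0, 0, 0) := by
    have hfun :
        (fun (s : Int × Int × Int) (rij : List String) =>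
          (PySem.List.pyRange 0 (PySem.List.len rij) 1).foldl
            (fun (s : Int × Int × Int) a =>
              if PySem.List.pyGetD rij a "" == "R" then (s.1 + 1, s.2.1, s.2.2)
              else if PySem.List.pyGetD rij a "" == "G" then (s.1, s.2.1 + 1, s.2.2)
              else (s.1, s.2.1, s.2.2 + 1)) s)
        = (fun (s : Int × Int × Int) (rij : List String) =>
            rij.foldl
              (fun (s : Int × Int × Int) c =>
                if c == "R" then (s.1 + 1, s.2.1, s.2.2)
                else if c == "G" then (s.1, s.2.1 + 1, s.2.2)
                else (s.1, s.2.1, s.2.2 + 1)) s) := by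
      funext s rij
      exact PySem.List.foldl_pyRange_pyGetD rij ""
        (fun (s : Int × Int × Int) c =>
          if c == "R" then (s.1 + 1, s.2.1, s.2.2)
          else if c == "G" then (s.1, s.2.1 + 1, s.2.2)
          else (s.1, s.2.1, s.2.2 + 1)) s (a := 0) (by omega)
    rw [hfun]
  simp only [h1, h2, kleuren_outer_fold]
  simp [PySem.List.len_eq]
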